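-- pv_equiv track=rewrite | github.com/Mosesjespar/Simple-Projects-Python- | Birthday paradox.py | get_Match
-- ===== SOURCE A (Python) =====
-- def get_Match(bds):
--     if len(bds) == len(set(bds)):  # Looking for similar birthdays
--         return None
--     else:
--         # comparing each birthday within the created list
--         for a, bd1 in enumerate(bds):
--             for b, bd2 in enumerate(bds[a + 1:]):
--                 if bd1 == bd2:
--                     return bd1
-- ===== SOURCE B (Python) =====
-- def get_Match(bds):
--     # Build a frequency table once, then return the first birthday (in list
--     # order) that occurs more than once; falls through to None if all unique.
--     counts = {}
--     for bd in bds: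
--         counts[bd] = counts.get(bd, 0) + 1
--     for bd in bds:
--         if counts.get(bd, 0) > 1:
--             return bd
--     return None
-- ===== Notes on version B (the rewrite author's own statement) =====
-- stated objective: idiomatic
-- what changed: Replaces A's uniqueness pre-check plus nested pairwise rescan with a single frequency-table build and one forward pass returning the first element whose count exceeds 1.
import Mathlib
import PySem

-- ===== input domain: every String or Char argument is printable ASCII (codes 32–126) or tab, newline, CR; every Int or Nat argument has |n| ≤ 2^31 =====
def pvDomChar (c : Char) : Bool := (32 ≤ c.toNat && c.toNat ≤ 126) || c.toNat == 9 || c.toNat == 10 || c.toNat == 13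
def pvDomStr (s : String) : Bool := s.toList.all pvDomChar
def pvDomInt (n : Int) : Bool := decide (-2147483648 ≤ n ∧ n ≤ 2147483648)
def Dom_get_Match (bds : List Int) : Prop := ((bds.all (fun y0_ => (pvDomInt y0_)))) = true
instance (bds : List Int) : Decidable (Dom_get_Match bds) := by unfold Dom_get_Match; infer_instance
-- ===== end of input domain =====

-- B replaces A's set-size pre-check + nested pairwise rescans with a single
-- frequency-table build and one forward pass (objective: idiomatic).


-- ===== PORT A =====
-- inner loop: 'for b, bd2 in enumerate(bds[a+1:]): if bd1 == bd2: return bd1'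
def innerA (bd1 : Int) : List Int → Option Int
  | [] => none
  | bd2 :: rest => if bd1 = bd2 then some bd1 else innerA bd1 rest

-- outer loop: 'for a, bd1 in enumerate(bds): …' (bds[a+1:] is the tail after bd1)
def outerA : List Int → Option Int
  | [] => none
  | bd1 :: rest =>
      match innerA bd1 rest with
      | some v => some v
      | none => outerA rest

def get_Match (bds : List Int) : Option Int :=
  if bds.length = (PySem.Set.ofList bds).length then none
  else outerA bds

-- ===== PORT B =====
-- 'counts = {}; for bd in bds: counts[bd] = counts.get(bd, 0) + 1'
def countLoop (bds : List Int) : PySem.Dict Int Int :=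
  bds.foldl (fun d bd => d.insert bd (d.getD bd 0 + 1)) PySem.Dict.empty

-- 'for bd in bds: if counts.get(bd, 0) > 1: return bd' then 'return None'
def scanLoop (counts : PySem.Dict Int Int) : List Int → Option Int
  | [] => none
  | bd :: rest => if 1 < counts.getD bd 0 then some bd else scanLoop counts rest

def get_Match_alt (bds : List Int) : Option Int :=
  scanLoop (countLoop bds) bds

-- ===== PRECONDITION & SPEC =====
def Spec_get_Match (bds : List Int) (out : Option Int) : Prop := out = get_Match_alt bds
instance (bds : List Int) (out : Option Int) : Decidable (Spec_get_Match bds out) := by unfold Spec_get_Match; infer_instance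

-- ===== CLAIM (what is proved, stated in full; the proofs are below) =====
def Claim_equal_get_Match : Prop := ∀ (bds : List Int), Dom_get_Match bds → Spec_get_Match bds (get_Match bds)

-- ===== LEMMAS AND PROOFS =====

theorem innerA_eq (x : Int) (l : List Int) :
    innerA x l = if x ∈ l then some x else none := by
  induction l with
  | nil => simp [innerA]
  | cons y ys ih =>
      by_cases h : x = y <;> simp [innerA, h, ih]

theorem find?_congr_mem {α : Type} {p q : α → Bool} {l : List α}
    (h : ∀ x ∈ l, p x = q x) : l.find? p = l.find? q := by
  induction l with
  | nil => rfl
  | cons x xs ih =>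
      have hx := h x (List.mem_cons_self)
      by_cases hp : p x = true
      · rw [List.find?_cons_of_pos hp, List.find?_cons_of_pos (hx ▸ hp)]
      · rw [List.find?_cons_of_neg hp, List.find?_cons_of_neg (hx ▸ hp),
          ih (fun y hy => h y (List.mem_cons_of_mem x hy))]

-- A's nested scan returns the first element (by index) that recurs later,
-- i.e. the first element whose multiplicity in the whole list exceeds 1.
theorem outerA_eq_find (l : List Int) :
    outerA l = l.find? (fun x => decide (1 < l.count x)) := by
  induction l with
  | nil => simp [outerA]
  | cons x rest ih =>
      by_cases hx : x ∈ rest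
      · have h1 : 1 ≤ rest.count x := List.one_le_count_iff.mpr hx
        have hpx : (decide (1 < (x :: rest).count x)) = true := by
          simp [List.count_cons_self]; omega
        rw [outerA, innerA_eq, if_pos hx,
          List.find?_cons_of_pos (p := fun y => decide (1 < (x :: rest).count y)) hpx]
      · have hc : rest.count x = 0 := List.count_eq_zero.mpr hx
        have hpx : ¬ (decide (1 < (x :: rest).count x)) = true := by
          simp [List.count_cons_self, hc]
        rw [outerA, innerA_eq]
        simp only [hx, ite_false]
        rw [List.find?_cons_of_neg (p := fun y => decide (1 < (x :: rest).count y)) hpx, ih]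
        apply find?_congr_mem
        intro y hy
        have hne : y ≠ x := fun h => hx (h ▸ hy)
        simp [Ne.symm hne]

theorem countLoop_getD (bds : List Int) (v : Int) :
    (countLoop bds).getD v 0 = (bds.count v : Int) := by
  unfold countLoop
  rw [PySem.Dict.getD_foldl_insert_add_one]
  simp [PySem.Dict.empty, PySem.Dict.getD, PySem.Dict.get?]

theorem scanLoop_eq_find (c : PySem.Dict Int Int) (l : List Int) :
    scanLoop c l = l.find? (fun x => decide (1 < c.getD x 0)) := by
  induction l with
  | nil => simp [scanLoop]
  | cons x rest ih =>
      by_cases h : 1 < c.getD x 0 <;> simp [scanLoop, h, ih]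

theorem alt_eq_find (bds : List Int) :
    get_Match_alt bds = bds.find? (fun x => decide (1 < bds.count x)) := by
  rw [get_Match_alt, scanLoop_eq_find]
  apply find?_congr_mem
  intro y _
  rw [countLoop_getD]
  simp only [decide_eq_decide]
  exact_mod_cast Iff.rfl

-- PySem.Set.ofList (first occurrences, in order) is a sublist of its argument.
theorem foldl_add_sublist (l : List Int) :
    ∀ s : List Int, (l.foldl PySem.Set.add s).Sublist (s ++ l) := by
  induction l with
  | nil => intro s; simp
  | cons x xs ih =>
      intro s
      have h2 : (PySem.Set.add s x ++ xs).Sublist (s ++ x :: xs) := by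
        unfold PySem.Set.add
        split
        · exact List.Sublist.append_left (List.sublist_cons_self x xs) s
        · simp [List.append_assoc]
      rw [List.foldl_cons]
      exact (ih (PySem.Set.add s x)).trans h2

theorem ofList_sublist (l : List Int) : (PySem.Set.ofList l).Sublist l := by
  have := foldl_add_sublist l []
  simpa [PySem.Set.ofList_eq_foldl] using this

theorem length_eq_iff_nodup (l : List Int) :
    l.length = (PySem.Set.ofList l).length ↔ l.Nodup := by
  constructor
  · intro h
    have := (ofList_sublist l).eq_of_length h.symm
    simpa [this] using PySem.Set.nodup_ofList l
  · intro h
    rw [show PySem.Set.ofList l = l from PySem.Set.ofList_eq_self_of_nodup l h]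

-- ===== VERDICT (by name: the statement is the Claim_ definition above) =====
theorem get_Match_spec : Claim_equal_get_Match := by
  intro bds _
  show get_Match bds = get_Match_alt bds
  rw [alt_eq_find, get_Match]
  by_cases hn : bds.Nodup
  · rw [if_pos ((length_eq_iff_nodup bds).mpr hn)]
    symm
    rw [List.find?_eq_none]
    intro x hx
    have := (List.nodup_iff_count_le_one.mp hn) x
    simp only [decide_eq_true_eq]
    omega
  · rw [if_neg (fun h => hn ((length_eq_iff_nodup bds).mp h))]
    exact outerA_eq_find bds
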